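-- pv_equiv track=rewrite | github.com/ahrtz/study | 혼자하는거/code/6.py | countPerms
-- ===== SOURCE A (Python) =====
-- def countPerms(n):
--     # Write your code here
--     if n==1:
--         return 5
--     temp=[1,1,1,1,1]
--     cnt=1
--     while cnt<n:
--         cnt+=1
--         temp2=[0,0,0,0,0]
--         temp2[0]=temp[1]+temp[2]+temp[4]
--         temp2[1]=temp[0]+temp[2]
--         temp2[2]=temp[1]+temp[3]
--         temp2[3]=temp[2]
--         temp2[4]=temp[2]+temp[3]
--         temp=temp2[:]
--     res=sum(temp)
--
--     return res%((10**9)+7)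
-- ===== SOURCE B (Python) =====
-- def countPerms(n):
--     # matrix exponentiation of the 5x5 vowel-transition matrix, mod 10**9+7
--     p = 10**9 + 7
--     M = [[0, 1, 1, 0, 1],
--          [1, 0, 1, 0, 0],
--          [0, 1, 0, 1, 0],
--          [0, 0, 1, 0, 0],
--          [0, 0, 1, 1, 0]]
--
--     def mul(A, B):
--         return [[sum(A[i][k] * B[k][j] for k in range(5)) % p for j in range(5)]
--                 for i in range(5)]
--
--     e = n - 1 if n > 1 else 0
--     R = [[1 if i == j else 0 for j in range(5)] for i in range(5)]
--     while e:
--         if e & 1: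
--             R = mul(R, M)
--         M = mul(M, M)
--         e >>= 1
--     return sum(sum(row) for row in R) % p
-- ===== Notes on version B (the rewrite author's own statement) =====
-- stated objective: faster
-- what changed: Replaces the step-by-step linear recurrence loop (which keeps ever-growing big integers and reduces mod 10**9+7 only at the end) by binary exponentiation of the 5x5 transition matrix with reduction mod 10**9+7 at every multiply.
import Mathlib
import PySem

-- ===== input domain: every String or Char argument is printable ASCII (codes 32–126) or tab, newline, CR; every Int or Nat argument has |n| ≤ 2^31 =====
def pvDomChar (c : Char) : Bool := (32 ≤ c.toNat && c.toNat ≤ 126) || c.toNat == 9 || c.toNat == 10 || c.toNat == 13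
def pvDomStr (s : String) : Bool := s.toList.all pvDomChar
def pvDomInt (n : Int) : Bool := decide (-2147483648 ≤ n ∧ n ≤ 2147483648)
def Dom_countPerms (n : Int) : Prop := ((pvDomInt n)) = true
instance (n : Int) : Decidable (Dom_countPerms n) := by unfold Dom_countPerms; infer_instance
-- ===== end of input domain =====

-- B replaces A's O(n) step-by-step recurrence (mod taken only at the end) by binary
-- exponentiation of the 5x5 transition matrix mod 10^9+7: objective = faster (asymptotic).

-- ===== PORT A =====

-- one iteration of A's while-body: temp2 computed from temp
def pvStepA (t : Int × Int × Int × Int × Int) : Int × Int × Int × Int × Int :=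
  (t.2.1 + t.2.2.1 + t.2.2.2.2, t.1 + t.2.2.1, t.2.1 + t.2.2.2.1, t.2.2.1, t.2.2.1 + t.2.2.2.1)

-- the 'while cnt < n' loop
def pvLoopA (n cnt : Int) (temp : Int × Int × Int × Int × Int) : Int × Int × Int × Int × Int :=
  if cnt < n then pvLoopA n (cnt + 1) (pvStepA temp) else temp
termination_by (n - cnt).toNat
decreasing_by omega

def countPerms (n : Int) : Int :=
  if n = 1 then 5
  else
    let t := pvLoopA n 1 (1, 1, 1, 1, 1)
    (t.1 + t.2.1 + t.2.2.1 + t.2.2.2.1 + t.2.2.2.2) % (10 ^ 9 + 7)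

-- ===== PORT B =====

def pvP : Int := 10 ^ 9 + 7

-- Source B's M: 5x5 transition matrix as a list of rows
def pvM0 : List (List Int) :=
  [[0, 1, 1, 0, 1],
   [1, 0, 1, 0, 0],
   [0, 1, 0, 1, 0],
   [0, 0, 1, 0, 0],
   [0, 0, 1, 1, 0]]

-- Source B's mul: entrywise (sum of products over range(5)) % p, built as a list of rows
def pvMulMod (A B : List (List Int)) : List (List Int) :=
  List.ofFn fun i : Fin 5 => List.ofFn fun j : Fin 5 =>
    (∑ k : Fin 5, (A[i.val]!)[k.val]! * (B[k.val]!)[j.val]!) % pvP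

-- Source B's identity-matrix comprehension
def pvIdMat : List (List Int) :=
  List.ofFn fun i : Fin 5 => List.ofFn fun j : Fin 5 => if i = j then (1 : Int) else 0

-- Source B's 'while e:' binary-exponentiation loop
def pvBinpow (e : Nat) (R M : List (List Int)) : List (List Int) :=
  if e = 0 then R
  else pvBinpow (e / 2) (if e % 2 = 1 then pvMulMod R M else R) (pvMulMod M M)
termination_by e
decreasing_by exact Nat.div_lt_self (Nat.pos_of_ne_zero (by omega)) (by norm_num)

def countPerms_alt (n : Int) : Int :=
  let e : Nat := (if 1 < n then n - 1 else 0).toNat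
  let R := pvBinpow e pvIdMat pvM0
  ((R.map fun row => row.sum).sum) % pvP

-- ===== PRECONDITION & SPEC =====
def Spec_countPerms (n : Int) (out : Int) : Prop := out = countPerms_alt n
instance (n : Int) (out : Int) : Decidable (Spec_countPerms n out) := by unfold Spec_countPerms; infer_instance

-- ===== CLAIM (what is proved, stated in full; the proofs are below) =====
def Claim_equal_countPerms : Prop := ∀ (n : Int), Dom_countPerms n → Spec_countPerms n (countPerms n)

-- ===== LEMMAS AND PROOFS =====

-- work in ZMod p
def pvN : ℕ := 10 ^ 9 + 7

-- read a 5x5 list matrix as a matrix over ZMod pvN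
def pvToMat (L : List (List Int)) : Matrix (Fin 5) (Fin 5) (ZMod pvN) :=
  Matrix.of fun i j => (((L[i.val]!)[j.val]! : Int) : ZMod pvN)

lemma pvP_eq : pvP = (pvN : Int) := by norm_num [pvP, pvN]

lemma pvCast_mod (x : Int) : (((x % pvP : Int)) : ZMod pvN) = (x : ZMod pvN) := by
  rw [pvP_eq]
  exact ZMod.intCast_mod x pvN

lemma pvGetElem_ofFn5 {α : Type} [Inhabited α] (g : Fin 5 → α) (i : Fin 5) :
    (List.ofFn g)[i.val]! = g i := by
  fin_cases i <;> simp

lemma pvMulMod_entry (A B : List (List Int)) (i j : Fin 5) :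
    ((pvMulMod A B)[i.val]!)[j.val]! = (∑ k : Fin 5, (A[i.val]!)[k.val]! * (B[k.val]!)[j.val]!) % pvP := by
  rw [pvMulMod, pvGetElem_ofFn5, pvGetElem_ofFn5]

lemma pvToMat_mulMod (A B : List (List Int)) :
    pvToMat (pvMulMod A B) = pvToMat A * pvToMat B := by
  ext i j
  simp only [pvToMat, Matrix.of_apply, Matrix.mul_apply, pvMulMod_entry, pvCast_mod]
  push_cast
  rfl

lemma pvToMat_id : pvToMat pvIdMat = 1 := by
  ext i j
  simp only [pvToMat, pvIdMat, Matrix.of_apply, pvGetElem_ofFn5, Matrix.one_apply]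
  split_ifs <;> simp

lemma pvBinpow_spec (e : Nat) (R M : List (List Int)) :
    pvToMat (pvBinpow e R M) = pvToMat R * pvToMat M ^ e := by
  induction e using Nat.strong_induction_on generalizing R M with
  | _ e ih =>
    rw [pvBinpow]
    by_cases h : e = 0
    · simp [h]
    · rw [if_neg h, ih (e / 2) (Nat.div_lt_self (Nat.pos_of_ne_zero h) (by norm_num)),
        pvToMat_mulMod]
      have he : e = 2 * (e / 2) + e % 2 := (Nat.div_add_mod e 2).symm.trans (by ring)
      by_cases hp : e % 2 = 1
      · rw [if_pos hp, pvToMat_mulMod]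
        conv_rhs => rw [he, hp, pow_add, pow_mul, pow_one, pow_two]
        rw [mul_assoc,
          (((Commute.refl (pvToMat M)).mul_right (Commute.refl (pvToMat M))).pow_right (e / 2)).eq]
      · have hp0 : e % 2 = 0 := by omega
        rw [if_neg hp]
        conv_rhs => rw [he, hp0, pow_add, pow_mul, pow_zero, mul_one, pow_two]

-- a 5x5 ofFn shape is preserved by pvBinpow
def pvShaped (L : List (List Int)) : Prop :=
  ∃ f : Fin 5 → Fin 5 → Int, L = List.ofFn fun i => List.ofFn fun j => f i j

lemma pvShaped_mulMod (A B : List (List Int)) : pvShaped (pvMulMod A B) :=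
  ⟨_, rfl⟩

lemma pvShaped_binpow (e : Nat) (R M : List (List Int)) (hR : pvShaped R) :
    pvShaped (pvBinpow e R M) := by
  induction e using Nat.strong_induction_on generalizing R M with
  | _ e ih =>
    rw [pvBinpow]
    by_cases h : e = 0
    · simpa [h] using hR
    · rw [if_neg h]
      refine ih (e / 2) (Nat.div_lt_self (Nat.pos_of_ne_zero h) (by norm_num)) _ _ ?_
      by_cases hp : e % 2 = 1
      · rw [if_pos hp]; exact pvShaped_mulMod R M
      · rw [if_neg hp]; exact hR

lemma pvShaped_id : pvShaped pvIdMat := ⟨_, rfl⟩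

-- the Python row-sum of a shaped list matrix, read in ZMod pvN
lemma pvSum_shaped (L : List (List Int)) (hL : pvShaped L) :
    (((L.map fun row => row.sum).sum : Int) : ZMod pvN) = ∑ i, ∑ j, pvToMat L i j := by
  obtain ⟨f, rfl⟩ := hL
  simp only [List.map_ofFn, Function.comp_def, List.sum_ofFn]
  push_cast
  refine Finset.sum_congr rfl fun i _ => Finset.sum_congr rfl fun j _ => ?_
  rw [pvToMat]
  simp only [Matrix.of_apply, pvGetElem_ofFn5]

-- A's state as a vector
def pvVec (t : Int × Int × Int × Int × Int) : Fin 5 → ZMod pvN :=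
  ![(t.1 : ZMod pvN), (t.2.1 : ZMod pvN), (t.2.2.1 : ZMod pvN), (t.2.2.2.1 : ZMod pvN), (t.2.2.2.2 : ZMod pvN)]

lemma pvStep_spec (t : Int × Int × Int × Int × Int) :
    pvVec (pvStepA t) = (pvToMat pvM0).mulVec (pvVec t) := by
  funext i
  fin_cases i <;>
    simp [pvVec, pvStepA, pvToMat, pvM0, Matrix.mulVec, dotProduct, Fin.sum_univ_five,
      List.getElem!_eq_getElem?_getD]

lemma pvLoopA_iterate (n cnt : Int) (t : Int × Int × Int × Int × Int) :
    pvLoopA n cnt t = pvStepA^[(n - cnt).toNat] t := by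
  by_cases h : cnt < n
  · have hk : (n - cnt).toNat = (n - (cnt + 1)).toNat + 1 := by omega
    rw [pvLoopA, if_pos h, pvLoopA_iterate n (cnt + 1) (pvStepA t), hk,
      Function.iterate_succ_apply]
  · have hk : (n - cnt).toNat = 0 := by omega
    rw [pvLoopA, if_neg h, hk, Function.iterate_zero_apply]
termination_by (n - cnt).toNat
decreasing_by omega

lemma pvIterate_spec (k : Nat) (t : Int × Int × Int × Int × Int) :
    pvVec (pvStepA^[k] t) = ((pvToMat pvM0) ^ k).mulVec (pvVec t) := by
  induction k with
  | zero => simp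
  | succ k ih =>
    rw [Function.iterate_succ_apply', pvStep_spec, ih, pow_succ', ← Matrix.mulVec_mulVec]

-- sum of A's vector after k steps = row-sum of B's matrix power, in ZMod pvN
lemma pvSum_eq (k : Nat) :
    (∑ i, pvVec (pvStepA^[k] (1,1,1,1,1)) i) = ∑ i, ∑ j, pvToMat (pvBinpow k pvIdMat pvM0) i j := by
  rw [pvBinpow_spec, pvToMat_id, one_mul]
  have h1 : pvVec (1,1,1,1,1) = fun _ => (1 : ZMod pvN) := by
    funext i; fin_cases i <;> simp [pvVec]
  simp [pvIterate_spec, h1, Matrix.mulVec, dotProduct]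

-- equal casts into ZMod pvN give equal remainders mod pvP
lemma pvMod_eq_of_cast_eq (a b : Int) (h : (a : ZMod pvN) = (b : ZMod pvN)) :
    a % pvP = b % pvP := by
  rw [pvP_eq]
  exact (ZMod.intCast_eq_intCast_iff' a b pvN).mp h

lemma pvMain (n : Int) (hn : n ≠ 1) : countPerms n = countPerms_alt n := by
  have hk : (if 1 < n then n - 1 else 0).toNat = (n - 1).toNat := by
    by_cases h : 1 < n
    · rw [if_pos h]
    · rw [if_neg h]; omega
  rw [countPerms, if_neg hn, countPerms_alt]
  simp only [hk]
  set k := (n - 1).toNat with hkdef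
  have hloop : pvLoopA n 1 (1,1,1,1,1) = pvStepA^[k] (1,1,1,1,1) := by
    rw [pvLoopA_iterate]
  rw [hloop]
  apply pvMod_eq_of_cast_eq
  have hsum := pvSum_eq k
  set t := pvStepA^[k] (1,1,1,1,1) with ht
  have hvec : ((t.1 + t.2.1 + t.2.2.1 + t.2.2.2.1 + t.2.2.2.2 : Int) : ZMod pvN)
      = ∑ i, pvVec t i := by
    simp [pvVec, Fin.sum_univ_five]
  rw [hvec, hsum, ← pvSum_shaped _ (pvShaped_binpow k pvIdMat pvM0 pvShaped_id)]

-- ===== VERDICT (by name: the statement is the Claim_ definition above) =====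
theorem countPerms_spec : Claim_equal_countPerms := by
  intro n _
  unfold Spec_countPerms
  by_cases h1 : n = 1
  · subst h1
    have hb0 : pvBinpow 0 pvIdMat pvM0 = pvIdMat := by
      rw [pvBinpow]; simp
    have hb : countPerms_alt 1 = 5 := by
      show ((pvBinpow ((if (1:Int) < 1 then (1:Int) - 1 else 0).toNat) pvIdMat pvM0).map fun row => row.sum).sum % pvP = 5
      norm_num [hb0]
      decide
    rw [hb, countPerms, if_pos rfl]
  · exact pvMain n h1
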